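-- pv_equiv track=rewrite | github.com/manyagupta13/srm | scripts/utils/answer_extraction.py | _fix_sqrt
-- ===== SOURCE A (Python) =====
-- def _fix_sqrt(string: str) -> str:
--     """Fix sqrt notation."""
--     if "\\sqrt" not in string:
--         return string
--     splits = string.split("\\sqrt")
--     new_string = splits[0]
--     for split in splits[1:]:
--         if not split.startswith("{"):
--             a = split[0]
--             new_substr = f"\\sqrt{{{a}}}{split[1:]}"
--             new_string += new_substr
--         else:
--             new_string += "\\sqrt" + split
--     return new_string
-- ===== SOURCE B (Python) =====
-- def _fix_sqrt(string: str) -> str: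
--     """Fix sqrt notation (single left-to-right index scan instead of split+rejoin)."""
--     if "\\sqrt" not in string:
--         return string
--     out = []
--     i = 0
--     n = len(string)
--     while i < n:
--         if string.startswith("\\sqrt", i):
--             i += 5
--             if i < n and string[i] == "{":
--                 out.append("\\sqrt")
--             else:
--                 out.append("\\sqrt{" + string[i] + "}")
--                 i += 1
--         else:
--             out.append(string[i])
--             i += 1
--     return "".join(out)
-- ===== Notes on version B (the rewrite author's own statement) =====
-- stated objective: alternative
-- what changed: Replaces the split-on-'\sqrt'-then-rejoin loop by a single left-to-right index scan that tests startswith('\sqrt', i) at each position and emits the braced form on the fly, never materialising the list of split pieces; Pre_ excludes exactly the inputs on which A raises IndexError (a '\sqrt' immediately followed by another '\sqrt' or by end of string), where B raises IndexError too on a trailing '\sqrt' and is otherwise unconstrained.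
-- outside the precondition, e.g. on _fix_sqrt('\\sqrt'): A raises IndexError, B raises IndexError
import Mathlib
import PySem

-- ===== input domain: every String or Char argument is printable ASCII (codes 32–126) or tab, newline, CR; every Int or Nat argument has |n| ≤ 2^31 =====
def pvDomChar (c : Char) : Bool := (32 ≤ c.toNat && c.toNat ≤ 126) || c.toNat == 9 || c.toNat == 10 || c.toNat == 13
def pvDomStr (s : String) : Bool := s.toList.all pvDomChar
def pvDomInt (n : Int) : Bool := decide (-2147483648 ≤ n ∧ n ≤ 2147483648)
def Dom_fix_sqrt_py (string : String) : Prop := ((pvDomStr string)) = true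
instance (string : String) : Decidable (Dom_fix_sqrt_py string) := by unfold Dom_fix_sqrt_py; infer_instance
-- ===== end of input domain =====

-- B replaces A's split-on-"\sqrt"-and-rejoin loop by a single left-to-right scan that
-- emits the braced form on the fly (alternative decomposition, same O(n) cost).

-- ===== PORT A =====
-- literal transliteration of A: early return, split on "\sqrt", rebuild piece by piece
def fix_sqrt_py (string : String) : String :=
  if PySem.Str.isIn "\\sqrt" string = false then string
  else
    let splits := PySem.Chars.splitOn string.toList "\\sqrt".toList
    match splits with
    | [] => ""        -- unreachable: Python's split never returns an empty list
    | s0 :: rest =>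
        String.ofList (rest.foldl (fun acc split =>
          if PySem.Chars.startswith split "{".toList = false then
            match split with
            | [] => acc          -- Python raises IndexError here (split[0]); excluded by Pre_
            | a :: tail => acc ++ ("\\sqrt{".toList ++ [a] ++ "}".toList ++ tail)
          else acc ++ ("\\sqrt".toList ++ split)) s0)

-- ===== PORT B =====
-- B's scan: at each position, if "\sqrt" starts here consume it and brace the next char
-- unless it is already '{'; otherwise copy one character.
def fixSqrtScan : List Char → List Char
  | [] => []
  | c :: rest =>
    if "\\sqrt".toList.isPrefixOf (c :: rest) then
      match h : (c :: rest).drop 5 with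
      | [] => "\\sqrt".toList      -- Python B raises IndexError here (string[i] at i = n); excluded by Pre_
      | a :: tail =>
        if a = '{' then "\\sqrt".toList ++ fixSqrtScan (a :: tail)
        else "\\sqrt{".toList ++ [a] ++ "}".toList ++ fixSqrtScan tail
    else c :: fixSqrtScan rest
termination_by l => l.length
decreasing_by
  · have := congrArg List.length h; simp at this ⊢; omega
  · have := congrArg List.length h; simp at this ⊢; omega
  · simp

def fix_sqrt_py_alt (string : String) : String :=
  if PySem.Str.isIn "\\sqrt" string = false then string
  else String.ofList (fixSqrtScan string.toList)

-- ===== PRECONDITION & SPEC =====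
-- Pre_ excludes exactly the inputs on which A raises IndexError: a "\sqrt" immediately
-- followed by another "\sqrt" or by the end of the string (an empty split piece).
def Pre_fix_sqrt_py (string : String) : Prop :=
  PySem.Str.isIn "\\sqrt\\sqrt" string = false ∧ PySem.Str.endswith string "\\sqrt" = false
instance (string : String) : Decidable (Pre_fix_sqrt_py string) := by unfold Pre_fix_sqrt_py; infer_instance

def pvWitness_fix_sqrt_py : String := "a\\sqrt2+\\sqrt{x}"

def Spec_fix_sqrt_py (string : String) (out : String) : Prop := out = fix_sqrt_py_alt string
instance (string : String) (out : String) : Decidable (Spec_fix_sqrt_py string out) := by unfold Spec_fix_sqrt_py; infer_instance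

-- ===== CLAIM (what is proved, stated in full; the proofs are below) =====
def Claim_equal_fix_sqrt_py : Prop := ∀ (string : String), Dom_fix_sqrt_py string → Pre_fix_sqrt_py string → Spec_fix_sqrt_py string (fix_sqrt_py string)

-- ===== LEMMAS AND PROOFS =====

lemma modifyHead_id_eq {α : Type} (l : List α) : List.modifyHead (fun x => x) l = l := by
  cases l <;> simp

-- clean recursive characterisation of Python's split on "\sqrt"
def splitF : List Char → List (List Char)
  | [] => [[]]
  | c :: rest =>
    if "\\sqrt".toList.isPrefixOf (c :: rest) then
      [] :: splitF ((c :: rest).drop 5)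
    else (splitF rest).modifyHead (c :: ·)
termination_by l => l.length
decreasing_by
  · simp
  · simp

-- the body of A's fold, as a function of the piece
def gPiece (split : List Char) : List Char :=
  if PySem.Chars.startswith split "{".toList = false then
    match split with
    | [] => []
    | a :: tail => "\\sqrt{".toList ++ [a] ++ "}".toList ++ tail
  else "\\sqrt".toList ++ split

lemma splitF_pos (c : Char) (rest : List Char)
    (hp : "\\sqrt".toList.isPrefixOf (c :: rest) = true) :
    splitF (c :: rest) = [] :: splitF ((c :: rest).drop 5) := by
  rw [splitF, if_pos hp]

lemma splitF_neg (c : Char) (rest : List Char)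
    (hp : ¬ "\\sqrt".toList.isPrefixOf (c :: rest) = true) :
    splitF (c :: rest) = (splitF rest).modifyHead (c :: ·) := by
  rw [splitF, if_neg hp]

lemma splitOn_go_eq :
    ∀ (fuel : ℕ) (l cur : List Char) (accs : List (List Char)), l.length < fuel →
      PySem.Chars.splitOn.go "\\sqrt".toList fuel l cur accs
        = accs.reverse ++ ((splitF l).modifyHead (cur.reverse ++ ·)) := by
  intro fuel
  induction fuel with
  | zero => intro l cur accs h; omega
  | succ f ih =>
    intro l cur accs h
    cases l with
    | nil =>
      rw [PySem.Chars.splitOn.go]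
      simp [splitF]
      omega
    | cons c rest =>
      rw [PySem.Chars.splitOn.go]
      by_cases hp : ("\\sqrt".toList).isPrefixOf (c :: rest) = true
      · rw [if_pos hp, ih _ _ _ (by simp at h ⊢; omega), splitF_pos c rest hp]
        simp [modifyHead_id_eq]
      · rw [if_neg hp, ih _ _ _ (by simp at h ⊢; omega), splitF_neg c rest hp]
        cases splitF rest <;> simp

lemma splitOn_eq (l : List Char) :
    PySem.Chars.splitOn l "\\sqrt".toList = splitF l := by
  rw [PySem.Chars.splitOn, splitOn_go_eq _ _ _ _ (by omega)]
  simp [modifyHead_id_eq]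

lemma splitF_ne_nil (l : List Char) : splitF l ≠ [] := by
  induction l using splitF.induct with
  | case1 => simp [splitF]
  | case2 c rest hp ih => rw [splitF_pos c rest hp]; simp
  | case3 c rest hp ih =>
      rw [splitF_neg c rest hp]
      cases h : splitF rest with
      | nil => exact absurd h ih
      | cons a b => simp

lemma foldl_eq_flatMap (pieces : List (List Char)) (init : List Char) :
    pieces.foldl (fun acc split =>
      if PySem.Chars.startswith split "{".toList = false then
        match split with
        | [] => acc
        | a :: tail => acc ++ ("\\sqrt{".toList ++ [a] ++ "}".toList ++ tail)
      else acc ++ ("\\sqrt".toList ++ split)) init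
    = init ++ pieces.flatMap gPiece := by
  induction pieces generalizing init with
  | nil => simp
  | cons p ps ih =>
    simp only [List.foldl_cons, List.flatMap_cons, ih]
    have : (if PySem.Chars.startswith p "{".toList = false then
        match p with
        | [] => init
        | a :: tail => init ++ ("\\sqrt{".toList ++ [a] ++ "}".toList ++ tail)
      else init ++ ("\\sqrt".toList ++ p)) = init ++ gPiece p := by
      unfold gPiece
      split
      · cases p <;> simp
      · rfl
    rw [this, List.append_assoc]

-- unfold lemmas for fixSqrtScan
lemma scan_nil : fixSqrtScan [] = [] := by rw [fixSqrtScan]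

lemma scan_nonpre (c : Char) (rest : List Char)
    (hp : ¬ "\\sqrt".toList.isPrefixOf (c :: rest) = true) :
    fixSqrtScan (c :: rest) = c :: fixSqrtScan rest := by
  rw [fixSqrtScan, if_neg hp]

lemma scan_pre_brace (c : Char) (rest tail : List Char)
    (hp : "\\sqrt".toList.isPrefixOf (c :: rest) = true)
    (hd : (c :: rest).drop 5 = '{' :: tail) :
    fixSqrtScan (c :: rest) = "\\sqrt".toList ++ fixSqrtScan ('{' :: tail) := by
  rw [fixSqrtScan, if_pos hp]
  split <;> simp_all

lemma scan_pre_char (c a : Char) (rest tail : List Char)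
    (hp : "\\sqrt".toList.isPrefixOf (c :: rest) = true)
    (hd : (c :: rest).drop 5 = a :: tail) (ha : a ≠ '{') :
    fixSqrtScan (c :: rest) = "\\sqrt{".toList ++ [a] ++ "}".toList ++ fixSqrtScan tail := by
  rw [fixSqrtScan, if_pos hp]
  split <;> simp_all

lemma main_lemma :
    ∀ (n : ℕ) (l : List Char), l.length ≤ n →
      ¬ ("\\sqrt\\sqrt".toList <:+: l) → ¬ ("\\sqrt".toList <:+ l) →
      (splitF l).headD [] ++ ((splitF l).tail).flatMap gPiece = fixSqrtScan l := by
  intro n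
  induction n with
  | zero =>
    intro l hl _ _
    have : l = [] := by cases l <;> simp_all
    subst this
    simp [splitF, scan_nil]
  | succ n ih =>
    intro l hl H1 H2
    cases l with
    | nil => simp [splitF, scan_nil]
    | cons c rest =>
      by_cases hp : ("\\sqrt".toList).isPrefixOf (c :: rest) = true
      · have hpre : "\\sqrt".toList <+: (c :: rest) := List.isPrefixOf_iff_prefix.mp hp
        obtain ⟨t, ht⟩ := hpre
        have hdrop : (c :: rest).drop 5 = t := by
          rw [← ht, show (5 : ℕ) = ("\\sqrt".toList).length from rfl, List.drop_left]
        rw [splitF_pos c rest hp, hdrop]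
        cases t with
        | nil =>
          apply absurd _ H2
          rw [← ht]
          simp
        | cons a t2 =>
          have hsufT : (a :: t2) <:+ (c :: rest) := ⟨"\\sqrt".toList, ht⟩
          have H1t : ¬ ("\\sqrt\\sqrt".toList <:+: (a :: t2)) :=
            fun hin => H1 (hin.trans hsufT.isInfix)
          have H2t : ¬ ("\\sqrt".toList <:+ (a :: t2)) := fun hs => H2 (hs.trans hsufT)
          have hlen : (a :: t2).length ≤ n := by
            have := congrArg List.length ht; simp at this hl ⊢; omega
          have hnp : ¬ ("\\sqrt".toList).isPrefixOf (a :: t2) = true := by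
            intro hq
            obtain ⟨u, hu⟩ := List.isPrefixOf_iff_prefix.mp hq
            apply H1
            refine List.IsPrefix.isInfix ⟨u, ?_⟩
            rw [show "\\sqrt\\sqrt".toList = "\\sqrt".toList ++ "\\sqrt".toList from rfl,
               List.append_assoc, hu, ht]
          rw [splitF_neg a t2 hnp]
          obtain ⟨h0, t0, hst⟩ : ∃ h0 t0, splitF t2 = h0 :: t0 := by
            cases h : splitF t2 with
            | nil => exact absurd h (splitF_ne_nil t2)
            | cons x y => exact ⟨x, y, rfl⟩
          rw [hst]
          have hARsub := ih (a :: t2) hlen H1t H2t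
          rw [splitF_neg a t2 hnp, hst] at hARsub
          by_cases ha : a = '{'
          · subst ha
            rw [scan_pre_brace c rest t2 hp hdrop, ← hARsub]
            simp [gPiece, PySem.Chars.startswith]
          · rw [scan_pre_char c a rest t2 hp hdrop ha]
            -- now reduce gPiece (a :: h0)
            have hg : gPiece (a :: h0) = "\\sqrt{".toList ++ [a] ++ "}".toList ++ h0 := by
              simp [gPiece, PySem.Chars.startswith, List.isPrefixOf, ha]
              exact fun hh => ha hh.symm
            -- sub-IH on t2
            have hsufR : t2 <:+ (c :: rest) := (List.suffix_cons a t2).trans hsufT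
            have H1r : ¬ ("\\sqrt\\sqrt".toList <:+: t2) := fun hin => H1 (hin.trans hsufR.isInfix)
            have H2r : ¬ ("\\sqrt".toList <:+ t2) := fun hs => H2 (hs.trans hsufR)
            have hlenr : t2.length ≤ n := by simp at hlen; omega
            have hARr := ih t2 hlenr H1r H2r
            rw [hst] at hARr
            simp only [List.headD_cons, List.tail_cons] at hARr ⊢
            simp [hg, ← hARr]
      · rw [splitF_neg c rest hp, scan_nonpre c rest hp]
        have hsufR : rest <:+ (c :: rest) := List.suffix_cons c rest
        have H1r : ¬ ("\\sqrt\\sqrt".toList <:+: rest) := fun hin => H1 (hin.trans hsufR.isInfix)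
        have H2r : ¬ ("\\sqrt".toList <:+ rest) := fun hs => H2 (hs.trans hsufR)
        have hlenr : rest.length ≤ n := by simp at hl; omega
        have hARr := ih rest hlenr H1r H2r
        obtain ⟨h0, t0, hst⟩ : ∃ h0 t0, splitF rest = h0 :: t0 := by
          cases h : splitF rest with
          | nil => exact absurd h (splitF_ne_nil rest)
          | cons x y => exact ⟨x, y, rfl⟩
        rw [hst] at hARr ⊢
        simp only [List.modifyHead_cons, List.headD_cons, List.tail_cons] at hARr ⊢
        rw [← hARr]
        simp

-- ===== VERDICT (by name: the statement is the Claim_ definition above) =====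
theorem fix_sqrt_py_spec : Claim_equal_fix_sqrt_py := by
  unfold Claim_equal_fix_sqrt_py Spec_fix_sqrt_py
  intro s _ hPre
  obtain ⟨h1, h2⟩ := hPre
  unfold fix_sqrt_py fix_sqrt_py_alt
  by_cases hin : PySem.Str.isIn "\\sqrt" s = false
  · rw [if_pos hin, if_pos hin]
  · rw [if_neg hin, if_neg hin]
    simp only [splitOn_eq]
    obtain ⟨s0, rest, hsp⟩ : ∃ s0 rest, splitF s.toList = s0 :: rest := by
      cases h : splitF s.toList with
      | nil => exact absurd h (splitF_ne_nil s.toList)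
      | cons x y => exact ⟨x, y, rfl⟩
    rw [hsp]
    simp only [foldl_eq_flatMap]
    congr 1
    have H1 : ¬ ("\\sqrt\\sqrt".toList <:+: s.toList) := by
      rw [← PySem.Chars.isIn_eq_false_iff]
      simpa using h1
    have H2 : ¬ ("\\sqrt".toList <:+ s.toList) := by
      intro hs
      have hb := (PySem.Chars.endswith_iff s.toList "\\sqrt".toList).mpr hs
      simp_all
    have := main_lemma s.toList.length s.toList le_rfl H1 H2
    rw [hsp] at this
    simpa using this
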